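-- pv_equiv track=rewrite | github.com/pocc/pcapgraph | pcap_algebra/pcap_math.py | convert_to_pcaptext
-- ===== SOURCE A (Python) =====
-- def convert_to_pcaptext(raw_packet, timestamp=''):
--     """Convert the raw pcap hex to a form that text2cap can read from stdin.
--
--     `tshark -r <file> -T json -x` produces the "in" and text2pcap
--     requires the "out" formats as shown below:
--
--     Per Text2pcap documentation:
--     "Text2pcap understands a hexdump of the form generated by od -Ax -tx1 -v."
--
--     In format (newlines added for readability):
--         247703511344881544abbfdd0800452000542bbc00007901e8fd080808080a301290000
--         082a563110001f930ab5b00000000a9e80d0000000000101112131415161718191a1b1c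
--         1d1e1f202122232425262728292a2b2c2d2e2f3031323334353637
--
--     Out format:
--         0000  24 77 03 51 13 44 88 15 44 ab bf dd 08 00 45 20
--         0010  00 54 2b bc 00 00 79 01 e8 fd 08 08 08 08 0a 30
--         0020  12 90 00 00 82 a5 63 11 00 01 f9 30 ab 5b 00 00
--         0030  00 00 a9 e8 0d 00 00 00 00 00 10 11 12 13 14 15
--         0040  16 17 18 19 1a 1b 1c 1d 1e 1f 20 21 22 23 24 25
--         0050  26 27 28 29 2a 2b 2c 2d 2e 2f 30 31 32 33 34 35
--         0060  36 37
--
--     NOTE: Output format doesn't need an extra \n between packets. So in the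
--     above example, the next line could be 0000  00 ... for the next packet.
--
--     Args:
--         raw_packet (string): The ASCII hexdump seen above in 'In'
--         timestamp (string): Unix epoch timestamp of packet. This is optional.
--             If one is passed in, it will precede the 0000 line of the packet.
--     """
--     # init vars
--     formatted_string = ''
--     hex_chars_per_line = 32
--     hex_chars_per_byte = 2
--     num_chars = len(raw_packet)
--
--     if timestamp:
--         formatted_string += str(timestamp) + '\n'
--     # Parse the string into lines and each line into space-delimited bytes.
--     for line_sep in range(0, num_chars, hex_chars_per_line):
--         raw_line = raw_packet[line_sep: line_sep + hex_chars_per_line]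
--         line = ''
--         for byte_sep in range(0, hex_chars_per_line, hex_chars_per_byte):
--             line += raw_line[byte_sep: byte_sep + hex_chars_per_byte] + ' '
--         line = line[:-1]  # get rid of trailing space
--         line_sep_hex = line_sep // 32 * 10  # Offsets need to be in hex.
--         formatted_string += '{:>04d}'.format(line_sep_hex) + '  ' + line + '\n'
--
--     return formatted_string
-- ===== SOURCE B (Python) =====
-- def convert_to_pcaptext(raw_packet, timestamp=''):
--     """Reformat raw hex into text2pcap hexdump lines.
--
--     Single tokenization pass: split the whole string into byte-pairs once,
--     pad the pair list to a multiple of 16 columns, then emit one line per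
--     group of 16 pairs.
--     """
--     pairs = [raw_packet[i:i + 2] for i in range(0, len(raw_packet), 2)]
--     pairs += [''] * (-len(pairs) % 16)  # pad the last line to 16 byte columns
--     out = []
--     if timestamp:
--         out.append(str(timestamp) + '\n')
--     for line_no in range(len(pairs) // 16):
--         out.append('{:>04d}'.format(line_no * 10) + '  '
--                    + ' '.join(pairs[16 * line_no:16 * line_no + 16]) + '\n')
--     return ''.join(out)
-- ===== Notes on version B (the rewrite author's own statement) =====
-- stated objective: alternative
-- what changed: B tokenizes the whole packet into byte-pairs in one flat pass, pads the pair list to a multiple of 16 columns, and emits each line as a single join over a 16-pair group, instead of A's nested loops that re-slice a 32-char window 16 times per line and strip a trailing space.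
import Mathlib
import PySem

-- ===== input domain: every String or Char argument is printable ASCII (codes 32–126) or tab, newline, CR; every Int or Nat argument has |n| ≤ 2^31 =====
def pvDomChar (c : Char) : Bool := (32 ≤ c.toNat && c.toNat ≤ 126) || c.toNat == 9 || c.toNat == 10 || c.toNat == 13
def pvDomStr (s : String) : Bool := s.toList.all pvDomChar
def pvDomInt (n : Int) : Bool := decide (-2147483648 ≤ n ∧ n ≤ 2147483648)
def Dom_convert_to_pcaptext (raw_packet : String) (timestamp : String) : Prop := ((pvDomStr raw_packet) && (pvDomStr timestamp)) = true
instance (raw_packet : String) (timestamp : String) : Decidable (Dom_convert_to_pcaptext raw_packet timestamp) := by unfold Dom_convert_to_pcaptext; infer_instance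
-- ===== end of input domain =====

-- B re-reads the packet as one flat list of byte-pairs padded to 16-column lines (one join per
-- line) instead of A's nested window/byte re-slicing; same output, proved on the full domain.


-- '{:>04d}'.format(n): str(n) right-aligned in width 4, zero-filled (both Pythons use it verbatim)
def pvFmt04 (n : Int) : List Char :=
  List.replicate (4 - (PySem.Int.toChars n).length) '0' ++ PySem.Int.toChars n

-- ===== PORT A =====
def convert_to_pcaptext (raw_packet : String) (timestamp : String) : String :=
  let cs := raw_packet.toList
  let num_chars : Int := (cs.length : Int)
  let init : List Char := if timestamp.toList ≠ [] then timestamp.toList ++ ['\n'] else []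
  let body := (PySem.List.pyRange 0 num_chars 32).foldl (fun formatted line_sep =>
    let raw_line := PySem.List.slice cs (some line_sep) (some (line_sep + 32))
    let line := (PySem.List.pyRange 0 32 2).foldl (fun line byte_sep =>
      line ++ PySem.List.slice raw_line (some byte_sep) (some (byte_sep + 2)) ++ [' ']) []
    let line' := PySem.List.slice line none (some (-1))
    formatted ++ pvFmt04 (PySem.Int.floordiv line_sep 32 * 10) ++ [' ', ' '] ++ line' ++ ['\n']) init
  String.ofList body

-- ===== PORT B =====
def convert_to_pcaptext_alt (raw_packet : String) (timestamp : String) : String :=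
  let cs := raw_packet.toList
  let pairs := (PySem.List.pyRange 0 (cs.length : Int) 2).map
    (fun i => PySem.List.slice cs (some i) (some (i + 2)))
  let padded := pairs ++ List.replicate (PySem.Int.mod (-(pairs.length : Int)) 16).toNat ([] : List Char)
  let out0 : List (List Char) := if timestamp.toList ≠ [] then [timestamp.toList ++ ['\n']] else []
  let out := (PySem.List.pyRange 0 (PySem.Int.floordiv (padded.length : Int) 16) 1).foldl
    (fun acc line_no => acc ++ [pvFmt04 (line_no * 10) ++ [' ', ' '] ++
      PySem.Chars.join [' '] (PySem.List.slice padded (some (16 * line_no)) (some (16 * line_no + 16))) ++ ['\n']]) out0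
  String.ofList (PySem.Chars.join [] out)

-- ===== PRECONDITION & SPEC =====
def Spec_convert_to_pcaptext (raw_packet : String) (timestamp : String) (out : String) : Prop := out = convert_to_pcaptext_alt raw_packet timestamp
instance (raw_packet : String) (timestamp : String) (out : String) : Decidable (Spec_convert_to_pcaptext raw_packet timestamp out) := by unfold Spec_convert_to_pcaptext; infer_instance

-- ===== CLAIM (what is proved, stated in full; the proofs are below) =====
def Claim_equal_convert_to_pcaptext : Prop := ∀ (raw_packet : String) (timestamp : String), Dom_convert_to_pcaptext raw_packet timestamp → Spec_convert_to_pcaptext raw_packet timestamp (convert_to_pcaptext raw_packet timestamp)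

-- ===== LEMMAS AND PROOFS =====

-- canonical form both programs are reduced to: line k's 16 byte-pair slots …
def pvPairsAt (cs : List Char) (k : Nat) : List (List Char) :=
  (List.range 16).map (fun i => ((cs.drop (32 * k + 2 * i)).take 2))

-- … and line k's full text
def pvBlock (cs : List Char) (k : Nat) : List Char :=
  pvFmt04 ((k : Int) * 10) ++ [' ', ' '] ++ PySem.Chars.join [' '] (pvPairsAt cs k) ++ ['\n']

theorem pv_join_nil_flatten (l : List (List Char)) : PySem.Chars.join [] l = l.flatten := by
  match l with
  | [] => simp [PySem.Chars.join_nil]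
  | [p] => simp [PySem.Chars.join_singleton]
  | p :: q :: r => rw [PySem.Chars.join_cons_cons, pv_join_nil_flatten (q :: r)]; simp

-- '(p0 + " ") + (p1 + " ") + … ' with the final char dropped IS ' '.join
theorem pv_dropLast_flatMap_space (ps : List (List Char)) (h : ps ≠ []) :
    (ps.flatMap (fun p => p ++ [' '])).dropLast = PySem.Chars.join [' '] ps := by
  match ps with
  | [p] => simp [PySem.Chars.join_singleton]
  | p :: q :: r =>
    rw [PySem.Chars.join_cons_cons, ← pv_dropLast_flatMap_space (q :: r) (by simp)]
    rw [List.flatMap_cons, List.dropLast_append_of_ne_nil (by simp [List.flatMap_cons])]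

theorem pv_slice2 (cs : List Char) (j : Nat) :
    PySem.List.slice cs (some (2 * (j:Int))) (some (2 * (j:Int) + 2)) = (cs.drop (2 * j)).take 2 := by
  rw [show (2 * (j:Int)) = ((2 * j : Nat) : Int) by push_cast; ring,
      show ((2 * j : Nat) : Int) + 2 = ((2 * j : Nat) : Int) + ((2 : Nat) : Int) by norm_num,
      PySem.List.slice_natCast_add]

theorem pv_slice16 (xs : List (List Char)) (k : Nat) :
    PySem.List.slice xs (some (16 * (k:Int))) (some (16 * (k:Int) + 16)) = (xs.drop (16 * k)).take 16 := by
  rw [show (16 * (k:Int)) = ((16 * k : Nat) : Int) by push_cast; ring,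
      show ((16 * k : Nat) : Int) + 16 = ((16 * k : Nat) : Int) + ((16 : Nat) : Int) by norm_num,
      PySem.List.slice_natCast_add]

theorem pv_slice32 (cs : List Char) (k : Nat) :
    PySem.List.slice cs (some (32 * (k:Int))) (some (32 * (k:Int) + 32)) = (cs.drop (32 * k)).take 32 := by
  rw [show (32 * (k:Int)) = ((32 * k : Nat) : Int) by push_cast; ring,
      show ((32 * k : Nat) : Int) + 32 = ((32 * k : Nat) : Int) + ((32 : Nat) : Int) by norm_num,
      PySem.List.slice_natCast_add]

-- A's inner 16-step byte loop (with the trailing space stripped) is ' '.join of the pair slots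
theorem pvA_line (chunk : List Char) :
    PySem.List.slice ((PySem.List.pyRange 0 32 2).foldl
      (fun line b => line ++ PySem.List.slice chunk (some b) (some (b + 2)) ++ [' ']) []) none (some (-1))
    = PySem.Chars.join [' '] ((List.range 16).map (fun i => (chunk.drop (2 * i)).take 2)) := by
  rw [PySem.List.slice_to_neg_one]
  rw [PySem.List.pyRange_of_pos 0 32 (by norm_num)]
  norm_num
  have hm : List.map ((fun x2 => PySem.List.slice chunk (some x2) (some (x2 + 2)) ++ [' ']) ∘ fun k : Nat => 2 * (k:Int))
        (List.range (Int.toNat 16))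
      = List.map (fun p => p ++ [' ']) ((List.range 16).map (fun i => (chunk.drop (2 * i)).take 2)) := by
    rw [List.map_map, show Int.toNat 16 = 16 from rfl]
    apply List.map_congr_left
    intro i _
    simp only [Function.comp]
    rw [show (2 * (i:Int)) = ((2 * i : Nat) : Int) by push_cast; ring,
        show ((2 * i : Nat) : Int) + 2 = ((2 * i : Nat) : Int) + ((2 : Nat) : Int) by norm_num,
        PySem.List.slice_natCast_add]
  rw [hm, ← List.flatMap_def]
  exact pv_dropLast_flatMap_space _ (by simp)

-- the pair slots of A's 32-char window are exactly the canonical slots of line k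
theorem pv_take32_pairs (cs : List Char) (k : Nat) :
    (List.range 16).map (fun i => (((cs.drop (32 * k)).take 32).drop (2 * i)).take 2) = pvPairsAt cs k := by
  apply List.map_congr_left
  intro i hi
  rw [List.mem_range] at hi
  rw [List.drop_take, List.take_take, show min 2 (32 - 2 * i) = 2 by omega, List.drop_drop]

-- the k-th 16-pair group of B's padded flat pair list is exactly the canonical slots of line k
theorem pv_padded_take (cs : List Char) (k np padN : Nat)
    (hnp : np = (cs.length + 1) / 2)
    (hpad : (padN : Int) = (-(np : Int)) % 16)
    (hk : 16 * k + 16 ≤ np + padN) :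
    ((((List.range np).map (fun j => (cs.drop (2 * j)).take 2)) ++
        List.replicate padN ([] : List Char)).drop (16 * k)).take 16 = pvPairsAt cs k := by
  apply List.ext_getElem?
  intro i
  by_cases hi : i < 16
  · rw [List.getElem?_take_of_lt hi, List.getElem?_drop]
    unfold pvPairsAt
    rw [List.getElem?_map, List.getElem?_range hi]
    by_cases hlt : 16 * k + i < np
    · rw [List.getElem?_append_left (by simpa using hlt), List.getElem?_map,
          List.getElem?_range hlt]
      simp only [Option.map_some]
      rw [show 2 * (16 * k + i) = 32 * k + 2 * i by ring]
    · rw [List.getElem?_append_right (by simpa using hlt)]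
      rw [List.getElem?_replicate]
      have h1 : 16 * k + i - (List.map (fun j => (cs.drop (2 * j)).take 2) (List.range np)).length < padN := by
        simp only [List.length_map, List.length_range]; omega
      rw [if_pos h1]
      simp only [Option.map_some]
      have h2 : cs.length ≤ 32 * k + 2 * i := by omega
      rw [List.drop_eq_nil_of_le h2]
      simp
  · rw [List.getElem?_eq_none, List.getElem?_eq_none] <;> simp [pvPairsAt] <;> omega

-- A's value in canonical form
theorem pvA_eq (raw_packet timestamp : String) :
    convert_to_pcaptext raw_packet timestamp =
      String.ofList ((if timestamp.toList ≠ [] then timestamp.toList ++ ['\n'] else []) ++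
        (List.range ((raw_packet.toList.length + 31) / 32)).flatMap (pvBlock raw_packet.toList)) := by
  simp only [convert_to_pcaptext]
  rw [PySem.List.pyRange_of_pos 0 (↑raw_packet.toList.length) (by norm_num)]
  rw [List.foldl_map]
  have hcount : (if (0:Int) < ↑raw_packet.toList.length
      then (((raw_packet.toList.length : Int) - 0 + 32 - 1) / 32).toNat else 0)
      = (raw_packet.toList.length + 31) / 32 := by
    split_ifs with h
    · omega
    · omega
  rw [hcount]
  have hfun : (fun (formatted : List Char) (k : Nat) =>
        formatted ++ pvFmt04 (PySem.Int.floordiv (0 + 32 * (k:Int)) 32 * 10) ++ [' ', ' '] ++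
          PySem.List.slice ((PySem.List.pyRange 0 32 2).foldl (fun line byte_sep =>
            line ++ PySem.List.slice (PySem.List.slice raw_packet.toList (some (0 + 32 * (k:Int))) (some (0 + 32 * (k:Int) + 32)))
              (some byte_sep) (some (byte_sep + 2)) ++ [' ']) []) none (some (-1)) ++ ['\n'])
      = (fun formatted k => formatted ++ pvBlock raw_packet.toList k) := by
    funext acc k
    simp only [zero_add]
    rw [pv_slice32, pvA_line, pv_take32_pairs]
    rw [PySem.Int.floordiv_eq_ediv_of_pos (by norm_num), Int.mul_ediv_cancel_left _ (by norm_num)]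
    simp [pvBlock, List.append_assoc]
  rw [hfun]
  rw [PySem.List.foldl_append_eq_flatMap]

-- B's value in the same canonical form
theorem pvB_eq (raw_packet timestamp : String) :
    convert_to_pcaptext_alt raw_packet timestamp =
      String.ofList ((if timestamp.toList ≠ [] then timestamp.toList ++ ['\n'] else []) ++
        (List.range ((raw_packet.toList.length + 31) / 32)).flatMap (pvBlock raw_packet.toList)) := by
  simp only [convert_to_pcaptext_alt]
  rw [PySem.List.pyRange_of_pos 0 (↑raw_packet.toList.length) (by norm_num : (0:Int) < 2)]
  rw [List.map_map]
  have hcnt : (if (0:Int) < ↑raw_packet.toList.length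
      then (((raw_packet.toList.length : Int) - 0 + 2 - 1) / 2).toNat else 0)
      = (raw_packet.toList.length + 1) / 2 := by
    split_ifs with h <;> omega
  rw [hcnt]
  have hpairs : (List.range ((raw_packet.toList.length + 1) / 2)).map
        ((fun i => PySem.List.slice raw_packet.toList (some i) (some (i + 2))) ∘ fun k : Nat => 0 + 2 * (k:Int))
      = (List.range ((raw_packet.toList.length + 1) / 2)).map
        (fun j => (raw_packet.toList.drop (2 * j)).take 2) := by
    apply List.map_congr_left
    intro j _
    simp only [Function.comp, zero_add]
    rw [pv_slice2]
  rw [hpairs]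
  simp only [List.length_append, List.length_map, List.length_range, List.length_replicate]
  set len := raw_packet.toList.length with hlen
  set np := (len + 1) / 2 with hnp
  set padN := (PySem.Int.mod (-(np : Int)) 16).toNat with hpadN
  have hpadN' : (padN : Int) = (-(np : Int)) % 16 := by
    rw [hpadN, PySem.Int.mod_eq_emod_of_pos (by norm_num : (0:Int) < 16)]
    exact Int.toNat_of_nonneg (Int.emod_nonneg _ (by norm_num))
  rw [PySem.Int.floordiv_eq_ediv_of_pos (by norm_num : (0:Int) < 16)]
  have hQ : ((np + padN : Nat) : Int) / 16 = (((len + 31) / 32 : Nat) : Int) := by omega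
  rw [hQ]
  rw [PySem.List.pyRange_one]
  have hQ2 : ((((len + 31) / 32 : Nat) : Int) - 0).toNat = (len + 31) / 32 := by omega
  rw [hQ2, List.foldl_map]
  simp only [zero_add]
  rw [PySem.List.foldl_append_singleton_eq_map]
  rw [pv_join_nil_flatten, List.flatten_append]
  have hb : (List.range ((len + 31) / 32)).map (fun (y : Nat) =>
        pvFmt04 ((y:Int) * 10) ++ [' ', ' '] ++
          PySem.Chars.join [' ']
            (PySem.List.slice
              (List.map (fun j => List.take 2 (List.drop (2 * j) raw_packet.toList)) (List.range np) ++
                List.replicate padN []) (some (16 * (y:Int))) (some (16 * (y:Int) + 16))) ++ ['\n'])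
      = (List.range ((len + 31) / 32)).map (pvBlock raw_packet.toList) := by
    apply List.map_congr_left
    intro k hk
    rw [List.mem_range] at hk
    rw [pv_slice16, pv_padded_take raw_packet.toList k np padN hnp hpadN' (by omega)]
    rfl
  rw [hb, ← List.flatMap_def]
  have hinit : (if timestamp.toList ≠ [] then [timestamp.toList ++ ['\n']] else []).flatten
      = (if timestamp.toList ≠ [] then timestamp.toList ++ ['\n'] else []) := by
    split_ifs <;> simp
  rw [hinit]

-- ===== VERDICT (by name: the statement is the Claim_ definition above) =====
theorem convert_to_pcaptext_spec : Claim_equal_convert_to_pcaptext := by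
  intro raw_packet timestamp _
  unfold Spec_convert_to_pcaptext
  rw [pvA_eq, pvB_eq]
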